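-- pv_equiv track=rewrite | github.com/Amangupta-05002/AI_Powered_Code_Reviewer_And_Quality_Assistant | streamlit_app.py | highlight_pep257_issues
-- ===== SOURCE A (Python) =====
-- def highlight_pep257_issues(code, warnings):
--     lines = code.split("\n")
--
--     for warn in warnings:
--         try:
--             parts = warn.split()
--             for part in parts:
--                 if part.isdigit():
--                     line_no = int(part)
--                     if 0 < line_no <= len(lines):
--                         lines[line_no - 1] = "🔴 " + lines[line_no - 1]
--                     break
--         except:
--             continue
--
--     return "\n".join(lines)
-- ===== SOURCE B (Python) =====
-- def highlight_pep257_issues(code, warnings):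
--     lines = code.split("\n")
--     # character-level scan: for each warning, find its first whitespace-delimited
--     # all-digit token with a small state machine (no split()), as an int
--     targets = []
--     for w in warnings:
--         tok = ""      # current run of non-whitespace characters
--         ok = True     # current run is all digits so far
--         found = None
--         for ch in w + " ":          # sentinel blank terminates the last token
--             if ch.isspace():
--                 if tok and ok:
--                     found = int(tok)
--                     break
--                 tok, ok = "", True
--             else:
--                 tok += ch
--                 ok = ok and ch.isdigit()
--         targets.append(found)
--     # emit pass: line i (1-based i+1) gets one marker per warning targeting it
--     return "\n".join("🔴 " * targets.count(i + 1) + line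
--                      for i, line in enumerate(lines))
-- ===== Notes on version B (the rewrite author's own statement) =====
-- stated objective: alternative
-- what changed: B drops both A's split()-then-token-scan and its in-place line mutation: a character-level state machine (with a sentinel blank) finds each warning's first whitespace-delimited all-digit token, and a separate emit pass builds each output line by counting how many warnings target it.
import Mathlib
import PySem

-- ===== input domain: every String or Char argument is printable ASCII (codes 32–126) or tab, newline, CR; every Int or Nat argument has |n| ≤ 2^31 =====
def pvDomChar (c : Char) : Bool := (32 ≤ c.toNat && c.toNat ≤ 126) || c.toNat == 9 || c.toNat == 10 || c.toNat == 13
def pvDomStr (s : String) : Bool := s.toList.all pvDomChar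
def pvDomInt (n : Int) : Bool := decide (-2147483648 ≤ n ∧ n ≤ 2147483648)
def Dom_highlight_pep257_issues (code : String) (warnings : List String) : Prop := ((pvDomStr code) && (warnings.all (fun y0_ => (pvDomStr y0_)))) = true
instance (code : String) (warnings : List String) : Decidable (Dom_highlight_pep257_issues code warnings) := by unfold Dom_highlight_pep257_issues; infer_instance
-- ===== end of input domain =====

-- B replaces A's split()-token scan + in-place mutation by a character state machine per warning and a count-per-line emit pass (alternative, not faster).


-- ===== PORT A =====
-- the inner `for part in parts: … break` loop; `int(part)` is PySem.Int.ofStr?, whose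
-- `none` case lands in A's bare `except: continue`; the guard 0 < line_no <= len(lines)
-- puts the index in range, so List.set / List.getD "" are exact for the item read/write;
-- code.split("\n") has a nonempty literal separator, so Str.split? is always `some`.
def pvMarkLoopA (ls : List String) : List String → List String
  | [] => ls
  | p :: ps =>
    if PySem.Str.strIsdigit p then
      match PySem.Int.ofStr? p with
      | none => ls
      | some line_no =>
        if 0 < line_no ∧ line_no ≤ (ls.length : Int) then
          ls.set (line_no - 1).toNat ("🔴 " ++ ls.getD (line_no - 1).toNat "")
        else ls
    else pvMarkLoopA ls ps

def highlight_pep257_issues (code : String) (warnings : List String) : String :=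
  let lines := (PySem.Str.split? code "\n").getD []
  PySem.Str.join "\n"
    (warnings.foldl (fun ls warn => pvMarkLoopA ls (PySem.Str.split₀ warn)) lines)

-- ===== PORT B =====
-- B's inner character loop over `w + " "` (state: tok = current run, ok = all digits so
-- far); returning is Python's `break` with `found` set, `int(tok)` is PySem.Int.ofChars?
def pvScanB : List Char → List Char → Bool → Option Int
  | [], _, _ => none
  | c :: cs, tok, ok =>
    if PySem.Chars.isspace c then
      if !tok.isEmpty && ok then PySem.Int.ofChars? tok
      else pvScanB cs [] true
    else pvScanB cs (tok ++ [c]) (ok && PySem.Chars.isdigit c)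

def pvTarget (w : String) : Option Int := pvScanB (w.toList ++ [' ']) [] true

-- `"🔴 " * k`: hand port of Python str*int (exact; the count k is never negative here)
def pvStrMul (s : String) : Nat → String
  | 0 => ""
  | m + 1 => s ++ pvStrMul s m

def highlight_pep257_issues_alt (code : String) (warnings : List String) : String :=
  let lines := (PySem.Str.split? code "\n").getD []
  let targets := warnings.map pvTarget
  PySem.Str.join "\n"
    ((PySem.List.enumerate lines).map
      (fun p => pvStrMul "🔴 " (PySem.List.count targets (some (p.1 + 1))) ++ p.2))

-- ===== PRECONDITION & SPEC =====
def Spec_highlight_pep257_issues (code : String) (warnings : List String) (out : String) : Prop := out = highlight_pep257_issues_alt code warnings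
instance (code : String) (warnings : List String) (out : String) : Decidable (Spec_highlight_pep257_issues code warnings out) := by unfold Spec_highlight_pep257_issues; infer_instance

-- ===== CLAIM (what is proved, stated in full; the proofs are below) =====
def Claim_equal_highlight_pep257_issues : Prop := ∀ (code : String) (warnings : List String), Dom_highlight_pep257_issues code warnings → Spec_highlight_pep257_issues code warnings (highlight_pep257_issues code warnings)

-- ===== LEMMAS AND PROOFS =====

-- one-step reductions of the library's split₀.go (definitional)
lemma go_nil (cur : List Char) (acc : List (List Char)) :
    PySem.Chars.split₀.go [] cur acc =
      if cur.isEmpty then acc.reverse else (cur.reverse :: acc).reverse := rfl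

lemma go_cons (c : Char) (cs cur : List Char) (acc : List (List Char)) :
    PySem.Chars.split₀.go (c :: cs) cur acc =
      if PySem.Chars.isspace c then
        if cur.isEmpty then PySem.Chars.split₀.go cs [] acc
        else PySem.Chars.split₀.go cs [] (cur.reverse :: acc)
      else PySem.Chars.split₀.go cs (c :: cur) acc := rfl

-- split₀.go's accumulator prepends its (reversed) finished tokens
lemma go_acc (cs : List Char) (cur : List Char) (acc : List (List Char)) :
    PySem.Chars.split₀.go cs cur acc = acc.reverse ++ PySem.Chars.split₀.go cs cur [] := by
  induction cs generalizing cur acc with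
  | nil =>
    by_cases h : cur.isEmpty <;> simp [go_nil, h]
  | cons c cs ih =>
    by_cases hs : PySem.Chars.isspace c
    · by_cases h : cur.isEmpty
      · rw [go_cons, go_cons, if_pos hs, if_pos hs, if_pos h, if_pos h, ih _ acc]
      · rw [go_cons, go_cons, if_pos hs, if_pos hs, if_neg h, if_neg h,
          ih [] (cur.reverse :: acc), ih [] [cur.reverse]]
        simp
    · rw [go_cons, go_cons, if_neg hs, if_neg hs, ih _ acc]

-- first all-digit split() token of a char list, converted (the value both sides extract)
def pvTok (l : List (List Char)) : Option Int :=
  (l.find? PySem.Chars.strIsdigit).bind PySem.Int.ofChars?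

-- B's character scan finds exactly the first all-digit split() token
lemma scan_go (cs : List Char) (cur : List Char) :
    pvScanB (cs ++ [' ']) cur.reverse (cur.all PySem.Chars.isdigit)
      = pvTok (PySem.Chars.split₀.go cs cur []) := by
  have hsp : PySem.Chars.isspace ' ' = true := by decide
  induction cs generalizing cur with
  | nil =>
    by_cases h : cur.isEmpty
    · have hc : cur = [] := by simpa using h
      subst hc
      simp [pvScanB, pvTok, go_nil, hsp]
    · by_cases hd : cur.all PySem.Chars.isdigit <;>
        simp [pvScanB, pvTok, go_nil, h, hd, hsp, List.find?, PySem.Chars.strIsdigit]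
  | cons c cs ih =>
    by_cases hs : PySem.Chars.isspace c
    · by_cases h : cur.isEmpty
      · have hc : cur = [] := by simpa using h
        subst hc
        rw [go_cons, if_pos hs, if_pos List.isEmpty_nil]
        simpa [pvScanB, hs] using ih []
      · rw [go_cons, if_pos hs, if_neg h, go_acc]
        by_cases hd : cur.all PySem.Chars.isdigit
        · simp [pvScanB, hs, h, hd, pvTok, PySem.Chars.strIsdigit]
        · have hfalse : PySem.Chars.strIsdigit cur.reverse = false := by
            simp [PySem.Chars.strIsdigit, hd]
          have hskip : pvTok ([cur.reverse].reverse ++ PySem.Chars.split₀.go cs [] []) =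
              pvTok (PySem.Chars.split₀.go cs [] []) := by
            simp [pvTok, hfalse]
          rw [hskip]
          simpa [pvScanB, hs, h, hd] using ih []
    · have harr : cur.reverse ++ [c] = (c :: cur).reverse := by simp
      have hall : (cur.all PySem.Chars.isdigit && PySem.Chars.isdigit c)
          = (c :: cur).all PySem.Chars.isdigit := by
        simp [List.all_cons, Bool.and_comm]
      rw [go_cons, if_neg hs, List.cons_append]
      show pvScanB (c :: (cs ++ [' '])) cur.reverse (cur.all PySem.Chars.isdigit) = _
      simp only [pvScanB, hs, if_false, Bool.false_eq_true, harr, hall]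
      exact ih (c :: cur)

-- A's extraction (first split() token that isdigit, via int()) as a function
def pvFirstLineNo (w : String) : Option Int :=
  match (PySem.Str.split₀ w).find? PySem.Str.strIsdigit with
  | none => none
  | some tok => PySem.Int.ofStr? tok

-- bridge: both extractions compute the same value
lemma firstLineNo_eq_target (w : String) : pvFirstLineNo w = pvTarget w := by
  have h2 : pvTarget w = pvTok (PySem.Chars.split₀ w.toList) := by
    simpa [pvTarget, PySem.Chars.split₀] using scan_go w.toList []
  rw [h2]
  unfold pvFirstLineNo pvTok
  rw [← PySem.Str.split₀_map_toList, List.find?_map]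
  have hc : (PySem.Chars.strIsdigit ∘ String.toList) = PySem.Str.strIsdigit := by
    funext s; simp [Function.comp, PySem.Str.strIsdigit_eq]
  rw [hc]
  cases h : (PySem.Str.split₀ w).find? PySem.Str.strIsdigit with
  | none => simp
  | some tok => simp [PySem.Int.ofStr?]

-- the index (line_no - 1) that a warning marks, against a fixed line count n
def pvIdx (n : Int) (w : String) : Option Int :=
  match pvFirstLineNo w with
  | none => none
  | some ln => if 0 < ln ∧ ln ≤ n then some (ln - 1) else none

lemma pvIdx_bounds {n : Int} {w : String} {k : Int} (h : pvIdx n w = some k) :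
    0 ≤ k ∧ k < n := by
  unfold pvIdx at h
  cases hf : pvFirstLineNo w with
  | none => simp [hf] at h
  | some ln =>
    simp only [hf] at h
    split at h
    · cases h; omega
    · cases h

lemma markLoopA_char (ls : List String) (w : String) :
    pvMarkLoopA ls (PySem.Str.split₀ w) =
      match pvIdx (ls.length : Int) w with
      | some k => ls.set k.toNat ("🔴 " ++ ls.getD k.toNat "")
      | none => ls := by
  unfold pvIdx pvFirstLineNo
  generalize PySem.Str.split₀ w = ps
  induction ps with
  | nil => simp [pvMarkLoopA]
  | cons p ps ih =>
    by_cases hd : PySem.Chars.strIsdigit p.toList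
    · cases h : PySem.Int.ofStr? p with
      | none => simp [pvMarkLoopA, hd, List.find?, h]
      | some ln =>
        by_cases hln : 0 < ln ∧ ln ≤ (ls.length : Int) <;>
          simp [pvMarkLoopA, hd, List.find?, h, hln]
    · simpa [pvMarkLoopA, hd, List.find?] using ih

lemma markLoopA_length (ls : List String) (w : String) :
    (pvMarkLoopA ls (PySem.Str.split₀ w)).length = ls.length := by
  rw [markLoopA_char]
  cases pvIdx (ls.length : Int) w <;> simp

-- repeated prepend of the marker
def pvAddMarks : Nat → String → String
  | 0, x => x
  | m + 1, x => "🔴 " ++ pvAddMarks m x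

lemma pvAddMarks_comm (m : Nat) (x : String) :
    pvAddMarks m ("🔴 " ++ x) = "🔴 " ++ pvAddMarks m x := by
  induction m with
  | zero => rfl
  | succ m ih => simp [pvAddMarks, ih]

lemma pvStrMul_append (c : Nat) (x : String) :
    pvStrMul "🔴 " c ++ x = pvAddMarks c x := by
  induction c with
  | zero => simp [pvStrMul, pvAddMarks]
  | succ c ih => rw [pvStrMul, pvAddMarks, String.append_assoc, ih]

lemma foldA_length (ws : List String) (ls : List String) :
    (ws.foldl (fun ls w => pvMarkLoopA ls (PySem.Str.split₀ w)) ls).length = ls.length := by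
  induction ws generalizing ls with
  | nil => rfl
  | cons w ws ih => rw [List.foldl_cons, ih, markLoopA_length]

lemma foldA_getD (ws : List String) (ls : List String) (i : Nat) (hi : i < ls.length) :
    (ws.foldl (fun ls w => pvMarkLoopA ls (PySem.Str.split₀ w)) ls).getD i "" =
      pvAddMarks (ws.countP (fun w => pvIdx (ls.length : Int) w == some (i : Int)))
        (ls.getD i "") := by
  induction ws generalizing ls with
  | nil => simp [pvAddMarks]
  | cons w ws ih =>
    rw [List.foldl_cons]
    have hlen := markLoopA_length ls w
    rw [ih (pvMarkLoopA ls (PySem.Str.split₀ w)) (by omega), hlen, markLoopA_char,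
      List.countP_cons]
    cases hk : pvIdx (ls.length : Int) w with
    | none => simp
    | some k =>
      have hb := pvIdx_bounds hk
      by_cases hik : k = (i : Int)
      · subst hik
        simp only [Int.toNat_natCast]
        rw [List.getD_eq_getElem _ _ (by simpa using hi), List.getElem_set_self,
          pvAddMarks_comm]
        simp [pvAddMarks]
      · have hne : k.toNat ≠ i := by omega
        rw [List.getD_eq_getElem _ _ (by simpa using hi),
          List.getElem_set_ne (by omega), ← List.getD_eq_getElem _ "" hi]
        simp [hik]

-- the two per-warning predicates agree for an in-range line index
lemma idx_count_eq (ws : List String) (n : Int) (i : Nat) (hi : (i : Int) < n) :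
    ws.countP (fun w => pvIdx n w == some (i : Int))
      = ws.countP (fun w => pvTarget w == some ((i : Int) + 1)) := by
  apply List.countP_congr
  intro w _
  rw [← firstLineNo_eq_target]
  unfold pvIdx
  cases hf : pvFirstLineNo w with
  | none => simp
  | some ln =>
    by_cases hln : 0 < ln ∧ ln ≤ n
    · simp only [if_pos hln]
      constructor <;> (intro h; simp only [beq_iff_eq, Option.some.injEq] at h ⊢; omega)
    · have h1 : (some ln == some ((i : Int) + 1)) = false := by
        simp only [beq_eq_false_iff_ne, ne_eq, Option.some.injEq]
        omega
      simp [if_neg hln, h1]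

theorem pv_main (code : String) (warnings : List String) :
    highlight_pep257_issues code warnings = highlight_pep257_issues_alt code warnings := by
  simp only [highlight_pep257_issues, highlight_pep257_issues_alt]
  generalize (PySem.Str.split? code "\n").getD [] = lines
  congr 1
  apply List.ext_getElem
  · rw [foldA_length]; simp
  · intro i h1 h2
    rw [← List.getD_eq_getElem _ "" h1]
    have hi : i < lines.length := by rw [foldA_length] at h1; exact h1
    rw [foldA_getD warnings lines i hi]
    rw [idx_count_eq warnings (lines.length : Int) i (by exact_mod_cast hi)]
    rw [List.getElem_map, PySem.List.getElem_enumerate, PySem.List.count_eq]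
    rw [pvStrMul_append]
    congr 1
    · rw [List.count_eq_countP', List.countP_map]
      apply List.countP_congr
      intro w _
      simp [Function.comp]
    · exact List.getD_eq_getElem _ "" hi

-- ===== VERDICT (by name: the statement is the Claim_ definition above) =====
theorem highlight_pep257_issues_spec : Claim_equal_highlight_pep257_issues := by
  intro code warnings _
  exact pv_main code warnings
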